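-- pv_equiv track=rewrite | github.com/gobiasinfosec/random_maths | lockBruteForce.Simplex.L1021B.Simple.py | fiveDigitPIN
-- ===== SOURCE A (Python) =====
-- def fiveDigitPIN(digits):
--     p5_list = []
--     # loop through all digits for each number, no digits can use 2 buttons, we only need to use single buttons here
--     for n1 in range(1, 6):
--         for n2 in range(1, 6):
--             # check to see if number is already used
--             if digits[n1] != digits[n2]:
--                 for n3 in range(1, 6):
--                     # check to see if number is already used
--                     if digits[n1] != digits[n3] and digits[n2] != digits[n3]:
--                         for n4 in range(1, 6):
--                             # check to see if number is already used
--                             if digits[n1] != digits[n4] and digits[n2] != digits[n4] and digits[n3] != digits[n4]: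
--                                 for n5 in range(1, 6):
--                                     # check to see if number is already used
--                                     if digits[n1] != digits[n5] and digits[n2] != digits[n5] and digits[n3] != digits[
--                                         n5] and digits[n4] != digits[n5]:
--                                         # no numbers have been repeated, add to list
--                                         p5_list = addFive(digits[n1], digits[n2], digits[n3], digits[n4], digits[n5],
--                                                           p5_list)
--     return p5_list
--
-- def addFive(n1, n2, n3, n4, n5, p5_list):
--     templist = [n1, n2, n3, n4, n5]
--     p5_list.append(templist)
--     return p5_list
-- ===== SOURCE B (Python) =====
-- def fiveDigitPIN(digits):
--     # Recursive backtracking over the value list (built once), pruning by a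
--     # single membership test instead of five nested loops with pairwise checks.
--     vals = [digits[i] for i in range(1, 6)]
--
--     def extend(chosen, acc):
--         if len(chosen) == 5:
--             acc.append(chosen)
--             return acc
--         for v in vals:
--             if v not in chosen:
--                 acc = extend(chosen + [v], acc)
--         return acc
--
--     return extend([], [])
-- ===== Notes on version B (the rewrite author's own statement) =====
-- stated objective: simpler
-- what changed: Replaced the five hard-coded nested index loops with their incremental pairwise inequality checks by a single recursive backtracker over the value list built once, pruning with one membership test per level.
import Mathlib
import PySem

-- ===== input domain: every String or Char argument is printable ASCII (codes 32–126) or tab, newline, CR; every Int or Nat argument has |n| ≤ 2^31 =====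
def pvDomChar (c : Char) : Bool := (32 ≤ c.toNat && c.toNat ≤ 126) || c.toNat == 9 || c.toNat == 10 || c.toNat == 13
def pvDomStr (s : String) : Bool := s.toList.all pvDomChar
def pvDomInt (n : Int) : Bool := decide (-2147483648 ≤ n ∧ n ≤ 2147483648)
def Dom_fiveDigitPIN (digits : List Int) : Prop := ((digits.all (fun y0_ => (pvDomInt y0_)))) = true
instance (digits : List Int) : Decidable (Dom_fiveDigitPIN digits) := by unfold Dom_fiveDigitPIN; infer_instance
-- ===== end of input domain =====

-- B replaces A's five nested index loops with pairwise checks by one recursive backtracker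
-- over the value list built once (objective: simpler); return values only, no mutation.

-- ===== PORT A =====
-- helper addFive: appends [n1..n5] to the accumulator, as in A
def addFive (n1 n2 n3 n4 n5 : Int) (p5 : List (List Int)) : List (List Int) :=
  p5 ++ [[n1, n2, n3, n4, n5]]

-- digits[n] for n ∈ 1..5: Pre_ guarantees 6 ≤ digits.length, so pyGetD is exact there
def fiveDigitPIN (digits : List Int) : List (List Int) :=
  let g := fun n => PySem.List.pyGetD digits n 0
  let r := PySem.List.pyRange 1 6 1
  r.foldl (fun acc n1 =>
    r.foldl (fun acc n2 =>
      if g n1 ≠ g n2 then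
        r.foldl (fun acc n3 =>
          if g n1 ≠ g n3 ∧ g n2 ≠ g n3 then
            r.foldl (fun acc n4 =>
              if g n1 ≠ g n4 ∧ g n2 ≠ g n4 ∧ g n3 ≠ g n4 then
                r.foldl (fun acc n5 =>
                  if g n1 ≠ g n5 ∧ g n2 ≠ g n5 ∧ g n3 ≠ g n5 ∧ g n4 ≠ g n5 then
                    addFive (g n1) (g n2) (g n3) (g n4) (g n5) acc
                  else acc) acc
              else acc) acc
          else acc) acc
      else acc) acc) []

-- ===== PORT B =====
-- extend(chosen, acc): fuel = 5 - len(chosen) makes the len(chosen)==5 test structural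
def pvExtendB (vals : List Int) : Nat → List Int → List (List Int) → List (List Int)
  | 0, chosen, acc => acc ++ [chosen]
  | k + 1, chosen, acc =>
      vals.foldl (fun a v => if v ∉ chosen then pvExtendB vals k (chosen ++ [v]) a else a) acc

def fiveDigitPIN_alt (digits : List Int) : List (List Int) :=
  let vals := (PySem.List.pyRange 1 6 1).map (fun i => PySem.List.pyGetD digits i 0)
  pvExtendB vals 5 [] []

-- ===== PRECONDITION & SPEC =====
-- A indexes digits[1]..digits[5] unconditionally, raising IndexError whenever len(digits) < 6
def Pre_fiveDigitPIN (digits : List Int) : Prop := 6 ≤ digits.length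
instance (digits : List Int) : Decidable (Pre_fiveDigitPIN digits) := by unfold Pre_fiveDigitPIN; infer_instance
def pvWitness_fiveDigitPIN : List Int := [0, 1, 2, 3, 4, 5]

def Spec_fiveDigitPIN (digits : List Int) (out : List (List Int)) : Prop := out = fiveDigitPIN_alt digits
instance (digits : List Int) (out : List (List Int)) : Decidable (Spec_fiveDigitPIN digits out) := by unfold Spec_fiveDigitPIN; infer_instance

-- ===== CLAIM (what is proved, stated in full; the proofs are below) =====
def Claim_equal_fiveDigitPIN : Prop := ∀ (digits : List Int), Dom_fiveDigitPIN digits → Pre_fiveDigitPIN digits → Spec_fiveDigitPIN digits (fiveDigitPIN digits)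

-- ===== LEMMAS AND PROOFS =====

theorem pvFoldlExt {α β : Type} {f g : β → α → β} {l : List α} {b : β}
    (h : ∀ x a, f x a = g x a) : l.foldl f b = l.foldl g b := by
  have : f = g := funext fun x => funext fun a => h x a
  rw [this]

-- core equality, for an arbitrary value table g (instantiated with digits[·])
theorem pvCore (g : Int → Int) :
    ((PySem.List.pyRange 1 6 1).foldl (fun acc n1 =>
      (PySem.List.pyRange 1 6 1).foldl (fun acc n2 =>
        if g n1 ≠ g n2 then
          (PySem.List.pyRange 1 6 1).foldl (fun acc n3 =>
            if g n1 ≠ g n3 ∧ g n2 ≠ g n3 then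
              (PySem.List.pyRange 1 6 1).foldl (fun acc n4 =>
                if g n1 ≠ g n4 ∧ g n2 ≠ g n4 ∧ g n3 ≠ g n4 then
                  (PySem.List.pyRange 1 6 1).foldl (fun acc n5 =>
                    if g n1 ≠ g n5 ∧ g n2 ≠ g n5 ∧ g n3 ≠ g n5 ∧ g n4 ≠ g n5 then
                      addFive (g n1) (g n2) (g n3) (g n4) (g n5) acc
                    else acc) acc
                else acc) acc
            else acc) acc
        else acc) acc) []) =
    pvExtendB ((PySem.List.pyRange 1 6 1).map g) 5 [] [] := by
  rw [show PySem.List.pyRange 1 6 1 = [1, 2, 3, 4, 5] from by decide]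
  simp only [pvExtendB, List.foldl_map]
  refine pvFoldlExt fun a n1 => ?_
  rw [if_pos (List.not_mem_nil)]
  refine pvFoldlExt fun a n2 => ?_
  by_cases h12 : g n1 = g n2
  · rw [if_neg (by simp [h12]), if_neg (by simp [h12])]
  · have hB2 : g n2 ∉ ([] ++ [g n1] : List Int) := by
      simp only [List.nil_append, List.mem_singleton]; exact fun e => h12 e.symm
    rw [if_pos h12, if_pos hB2]
    refine pvFoldlExt fun a n3 => ?_
    by_cases hm3 : g n3 ∈ ([] ++ [g n1] ++ [g n2] : List Int)
    · have hA : ¬(g n1 ≠ g n3 ∧ g n2 ≠ g n3) := by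
        simp only [List.nil_append, List.mem_append, List.mem_singleton] at hm3
        rcases hm3 with h | h <;> simp [h]
      rw [if_neg (not_not_intro hm3), if_neg hA]
    · have hm' := hm3
      simp only [List.nil_append, List.mem_append, List.mem_singleton, not_or] at hm'
      have hA : g n1 ≠ g n3 ∧ g n2 ≠ g n3 :=
        ⟨fun e => hm'.1 e.symm, fun e => hm'.2 e.symm⟩
      rw [if_pos hm3, if_pos hA]
      refine pvFoldlExt fun a n4 => ?_
      by_cases hm4 : g n4 ∈ ([] ++ [g n1] ++ [g n2] ++ [g n3] : List Int)
      · have hA4 : ¬(g n1 ≠ g n4 ∧ g n2 ≠ g n4 ∧ g n3 ≠ g n4) := by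
          simp only [List.nil_append, List.mem_append, List.mem_singleton] at hm4
          rcases hm4 with (h | h) | h <;> simp [h]
        rw [if_neg (not_not_intro hm4), if_neg hA4]
      · have hm' := hm4
        simp only [List.nil_append, List.mem_append, List.mem_singleton, not_or] at hm'
        have hA4 : g n1 ≠ g n4 ∧ g n2 ≠ g n4 ∧ g n3 ≠ g n4 :=
          ⟨fun e => hm'.1.1 e.symm, fun e => hm'.1.2 e.symm, fun e => hm'.2 e.symm⟩
        rw [if_pos hm4, if_pos hA4]
        refine pvFoldlExt fun a n5 => ?_
        by_cases hm5 : g n5 ∈ ([] ++ [g n1] ++ [g n2] ++ [g n3] ++ [g n4] : List Int)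
        · have hA5 : ¬(g n1 ≠ g n5 ∧ g n2 ≠ g n5 ∧ g n3 ≠ g n5 ∧ g n4 ≠ g n5) := by
            simp only [List.nil_append, List.mem_append, List.mem_singleton] at hm5
            rcases hm5 with ((h | h) | h) | h <;> simp [h]
          rw [if_neg (not_not_intro hm5), if_neg hA5]
        · have hm' := hm5
          simp only [List.nil_append, List.mem_append, List.mem_singleton, not_or] at hm'
          have hA5 : g n1 ≠ g n5 ∧ g n2 ≠ g n5 ∧ g n3 ≠ g n5 ∧ g n4 ≠ g n5 :=
            ⟨fun e => hm'.1.1.1 e.symm, fun e => hm'.1.1.2 e.symm,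
             fun e => hm'.1.2 e.symm, fun e => hm'.2 e.symm⟩
          rw [if_pos hm5, if_pos hA5]
          simp [addFive]

-- ===== VERDICT (by name: the statement is the Claim_ definition above) =====
theorem fiveDigitPIN_spec : Claim_equal_fiveDigitPIN := by
  intro digits _ _
  unfold Spec_fiveDigitPIN fiveDigitPIN fiveDigitPIN_alt
  exact pvCore (fun n => PySem.List.pyGetD digits n 0)
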